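-- pv_equiv track=rewrite | github.com/SeungUkLee/codewars-legacy | 5-kyu/Find the unique string/python/Find the unique string.py | find_uniq
-- ===== SOURCE A (Python) =====
-- from collections import defaultdict
--
-- def find_uniq(a):
--     d = {}
--     c = defaultdict(int)
--     for e in a:
--         t = frozenset(e.strip().lower())
--         d[t] = e
--         c[t] += 1
--
--     return d[next(filter(lambda k: c[k] == 1, c))]
-- ===== SOURCE B (Python) =====
-- def find_uniq(a):
--     keys = [frozenset(e.strip().lower()) for e in a]
--     seen = set()
--     for i, (e, k) in enumerate(zip(a, keys)):
--         if k not in seen and k not in keys[i + 1:]: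
--             return e
--         seen.add(k)
-- ===== Notes on version B (the rewrite author's own statement) =====
-- stated objective: alternative
-- what changed: Replaces A's table building (last-value dict plus a frequency counter, then a scan over the counter's keys) by a single indexed pass that keeps a 'seen' set of earlier char-sets and returns the first element whose char-set is neither in 'seen' nor among the later char-sets - uniqueness by before/after membership, no counting and no dict.
import Mathlib
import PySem

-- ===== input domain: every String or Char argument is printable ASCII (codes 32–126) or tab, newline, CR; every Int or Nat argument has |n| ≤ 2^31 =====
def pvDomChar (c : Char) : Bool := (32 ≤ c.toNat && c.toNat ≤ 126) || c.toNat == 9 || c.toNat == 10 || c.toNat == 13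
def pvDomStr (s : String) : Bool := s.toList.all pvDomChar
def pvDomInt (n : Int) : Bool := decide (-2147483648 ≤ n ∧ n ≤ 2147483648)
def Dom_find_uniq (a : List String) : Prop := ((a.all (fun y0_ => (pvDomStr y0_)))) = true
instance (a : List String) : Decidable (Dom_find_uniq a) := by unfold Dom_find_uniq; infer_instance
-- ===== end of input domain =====

-- B replaces A's table building (last-value dict + frequency counter, then a key scan) by a single
-- indexed pass with a 'seen' set and a lookahead membership test: no counting, no dict.
-- frozenset(e.strip().lower()) is modelled as the SORTED list of the distinct characters: two such
-- canonical lists are (structurally) equal exactly when the Python frozensets are equal, which makes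
-- structural key equality in the Dict / the sets below coincide with Python's frozenset equality.
def normKey (e : String) : List Char :=
  PySem.List.sorted (PySem.Set.ofList (PySem.Chars.lower (PySem.Chars.strip e.toList))) (fun c => c)

-- ===== PORT A =====
def find_uniq (a : List String) : String :=
  let st := a.foldl
    (fun (p : PySem.Dict (List Char) String × PySem.Dict (List Char) Int) e =>
      (p.1.insert (normKey e) e, p.2.insert (normKey e) (p.2.getD (normKey e) 0 + 1)))
    (PySem.Dict.empty, PySem.Dict.empty)
  match (st.2.keys).find? (fun k => st.2.getD k 0 == 1) with
  | some k => st.1.getD k ""            -- d[next(filter(...))]; the key is present in d by construction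
  | none   => ""                        -- next() on an exhausted filter: StopIteration, excluded by Pre_

-- ===== PORT B =====
-- the loop of Source B over 'enumerate(zip(a, keys))'; at index i the remaining keys keys[i+1:] are
-- exactly the second components of the remaining zip pairs, so the slice is 'rest.map Prod.snd'
def findUniqGo : List (String × List Char) → PySem.Set (List Char) → String
  | [], _ => ""                         -- loop exhausted: Python returns None; excluded by Pre_
  | (e, k) :: rest, seen =>
      if !(seen.contains k) && !((rest.map Prod.snd).contains k) then e
      else findUniqGo rest (PySem.Set.add seen k)

def find_uniq_alt (a : List String) : String :=
  let keys := a.map normKey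
  findUniqGo (a.zip keys) PySem.Set.empty

-- ===== PRECONDITION & SPEC =====
-- Pre_ excludes exactly the inputs (including []) on which A raises StopIteration (and B's loop
-- falls through, returning None): those with no element whose normalized char-set occurs once.
def Pre_find_uniq (a : List String) : Prop :=
  ∃ e ∈ a, (a.map normKey).count (normKey e) = 1
instance (a : List String) : Decidable (Pre_find_uniq a) := by unfold Pre_find_uniq; infer_instance

def pvWitness_find_uniq : List String := ["ab", "b", "B "]

def Spec_find_uniq (a : List String) (out : String) : Prop := out = find_uniq_alt a
instance (a : List String) (out : String) : Decidable (Spec_find_uniq a out) := by unfold Spec_find_uniq; infer_instance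

-- ===== CLAIM (what is proved, stated in full; the proofs are below) =====
def Claim_equal_find_uniq : Prop := ∀ (a : List String), Dom_find_uniq a → Pre_find_uniq a → Spec_find_uniq a (find_uniq a)

-- ===== LEMMAS AND PROOFS =====

-- both programs compute: the first element of a whose normalized key occurs exactly once
def firstUniq (a : List String) : String :=
  match a.find? (fun e => (a.map normKey).count (normKey e) == 1) with
  | some e => e
  | none   => ""

-- find? over set(xs) (first-insertion order) equals find? over xs for a predicate on values.
theorem find?_foldl_add {α : Type} [BEq α] [LawfulBEq α] (p : α → Bool) :
    ∀ (xs : List α) (s : List α),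
      ((xs.foldl PySem.Set.add s).find? p) =
        ((s.find? p).or (xs.find? (fun x => p x && !(s.contains x)))) := by
  intro xs
  induction xs with
  | nil => intro s; simp
  | cons x xs ih =>
    intro s
    simp only [List.foldl_cons]
    rw [ih]
    by_cases hx : x ∈ s
    · rw [PySem.Set.add_of_mem hx]
      simp [hx]
    · rw [PySem.Set.add_of_not_mem hx]
      by_cases hp : p x = true
      · cases hfs : List.find? p s <;>
          simp [List.find?_append, hp, hx, hfs]
      · have hp' : p x = false := by simpa using hp
        have hpred : (fun y => p y && !decide (y ∈ s ++ [x])) =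
            (fun y => p y && !decide (y ∈ s)) := by
          funext y
          by_cases hy : y = x
          · subst hy; simp [hp']
          · simp [List.mem_append, hy]
        simp [List.find?_append, hp', hx, hpred]

theorem find?_ofList {α : Type} [BEq α] [LawfulBEq α] (p : α → Bool) (xs : List α) :
    (PySem.Set.ofList xs).find? p = xs.find? p := by
  rw [PySem.Set.ofList_eq_foldl, find?_foldl_add]
  simp

-- the last-value dict is untouched by elements with other keys
theorem foldl_insert_get?_not_mem :
    ∀ (l : List String) (d : PySem.Dict (List Char) String) (k : List Char),
      k ∉ l.map normKey →
      (l.foldl (fun d e => d.insert (normKey e) e) d).get? k = d.get? k := by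
  intro l
  induction l with
  | nil => intro d k _; rfl
  | cons e l ih =>
    intro d k hk
    simp only [List.map_cons, List.mem_cons, not_or] at hk
    simp only [List.foldl_cons]
    rw [ih _ _ hk.2, PySem.Dict.get?_insert_of_ne _ _ hk.1]

-- with a unique key, the last-value dict holds exactly that element
theorem dict_lookup_of_count_one (a : List String) (e : String)
    (he : e ∈ a) (hcnt : (a.map normKey).count (normKey e) = 1) :
    (a.foldl (fun d x => d.insert (normKey x) x) PySem.Dict.empty).getD (normKey e) "" = e := by
  obtain ⟨l₁, l₂, rfl⟩ := List.append_of_mem he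
  have h2 : normKey e ∉ l₂.map normKey := by
    intro hmem
    have : 1 ≤ (l₂.map normKey).count (normKey e) := List.one_le_count_iff.mpr hmem
    simp only [List.map_append, List.map_cons, List.count_append, List.count_cons_self] at hcnt
    omega
  rw [List.foldl_append, List.foldl_cons]
  have := foldl_insert_get?_not_mem l₂
    ((l₁.foldl (fun d x => d.insert (normKey x) x) PySem.Dict.empty).insert (normKey e) e)
    (normKey e) h2
  simp only [PySem.Dict.getD_eq_get?_getD] at *
  rw [this, PySem.Dict.get?_insert_self]
  rfl

-- zip a (map f a) = map (fun e => (e, f e)) a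
theorem zip_map_self {α β : Type} (f : α → β) :
    ∀ (a : List α), a.zip (a.map f) = a.map (fun e => (e, f e)) := by
  intro a; induction a with
  | nil => rfl
  | cons x a ih => simp [List.zip_cons_cons, ih]

-- A equals the common characterisation
theorem find_uniq_eq_firstUniq (a : List String) : find_uniq a = firstUniq a := by
  unfold find_uniq firstUniq
  have hsplit := PySem.List.foldl_prod_mk
    (fun (d : PySem.Dict (List Char) String) e => d.insert (normKey e) e)
    (fun (d : PySem.Dict (List Char) Int) e => d.insert (normKey e) (d.getD (normKey e) 0 + 1))
    a PySem.Dict.empty PySem.Dict.empty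
  simp only [hsplit]
  have hc : a.foldl
      (fun (d : PySem.Dict (List Char) Int) e => d.insert (normKey e) (d.getD (normKey e) 0 + 1))
      PySem.Dict.empty = PySem.Dict.counter (a.map normKey) := by
    rw [← PySem.Dict.foldl_insert_getD_add_one_eq_counter, List.foldl_map]
  rw [hc, PySem.Dict.keys_counter, find?_ofList]
  have hpred : (fun k => (PySem.Dict.counter (a.map normKey)).getD k 0 == 1) =
      (fun k => (a.map normKey).count k == 1) := by
    funext k
    rw [PySem.Dict.getD_counter]
    simp [Nat.cast_eq_one]
  rw [hpred, List.find?_map]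
  simp only [Function.comp_def]
  cases h : a.find? (fun e => (a.map normKey).count (normKey e) == 1) with
  | none => rfl
  | some e =>
    simp only [Option.map_some]
    exact dict_lookup_of_count_one a e (List.mem_of_find?_eq_some h)
      (by simpa using List.find?_some h)

-- the loop invariant of B: 'seen' holds exactly the keys of the processed prefix
theorem findUniqGo_spec :
    ∀ (l : List (String × List Char)) (seen : PySem.Set (List Char)) (pre : List (List Char)),
      (∀ k, k ∈ seen ↔ k ∈ pre) →
      findUniqGo l seen =
        (match l.find? (fun p => (pre ++ l.map Prod.snd).count p.2 == 1) with
         | some p => p.1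
         | none   => "") := by
  intro l
  induction l with
  | nil => intro seen pre _; rfl
  | cons p rest ih =>
    obtain ⟨e, k⟩ := p
    intro seen pre hseen
    simp only [findUniqGo, List.map_cons, List.find?_cons]
    have hcnt : (pre ++ k :: rest.map Prod.snd).count k
        = pre.count k + 1 + (rest.map Prod.snd).count k := by
      simp [List.count_append]; omega
    have hrec : findUniqGo rest (PySem.Set.add seen k) =
        (match rest.find? (fun p => (pre ++ k :: rest.map Prod.snd).count p.2 == 1) with
         | some p => p.1
         | none   => "") := by
      rw [ih (PySem.Set.add seen k) (pre ++ [k])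
        (by
          intro k'
          rw [PySem.Set.mem_add]
          simp [hseen k', or_comm, List.mem_append])]
      have hpe : (fun (q : String × List Char) =>
            (((pre ++ [k]) ++ rest.map Prod.snd).count q.2 == 1))
          = (fun (q : String × List Char) =>
            ((pre ++ k :: rest.map Prod.snd).count q.2 == 1)) := by
        funext q
        have : ((pre ++ [k]) ++ rest.map Prod.snd).count q.2
            = (pre ++ k :: rest.map Prod.snd).count q.2 := by
          simp [List.count_append]
        rw [this]
      rw [hpe]
    by_cases h1 : k ∈ seen
    · have hpre1 : 1 ≤ pre.count k := List.one_le_count_iff.mpr ((hseen k).mp h1)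
      have hc1 : PySem.Set.contains seen k = true := (PySem.Set.contains_iff seen k).mpr h1
      have hhead : ((pre ++ k :: rest.map Prod.snd).count k == 1) = false := by
        rw [hcnt]; simp; omega
      rw [hc1, hhead]
      simpa using hrec
    · by_cases h2 : k ∈ rest.map Prod.snd
      · have hrest1 : 1 ≤ (rest.map Prod.snd).count k := List.one_le_count_iff.mpr h2
        have hc2 : (rest.map Prod.snd).contains k = true := by simp [h2]
        have hhead : ((pre ++ k :: rest.map Prod.snd).count k == 1) = false := by
          rw [hcnt]; simp; omega
        rw [hc2, hhead]
        have hc1 : PySem.Set.contains seen k = false := by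
          simp only [PySem.Set.contains_eq_listContains]
          simp [h1]
        rw [hc1]
        simpa using hrec
      · have hpre0 : pre.count k = 0 := List.count_eq_zero.mpr (fun hm => h1 ((hseen k).mpr hm))
        have hrest0 : (rest.map Prod.snd).count k = 0 := List.count_eq_zero.mpr h2
        have hc1 : PySem.Set.contains seen k = false := by
          simp only [PySem.Set.contains_eq_listContains]
          simp [h1]
        have hc2 : (rest.map Prod.snd).contains k = false := by simp [h2]
        have hhead : ((pre ++ k :: rest.map Prod.snd).count k == 1) = true := by
          rw [hcnt, hpre0, hrest0]; simp
        rw [hc1, hc2, hhead]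
        rfl

-- B equals the common characterisation
theorem find_uniq_alt_eq_firstUniq (a : List String) : find_uniq_alt a = firstUniq a := by
  unfold find_uniq_alt firstUniq
  rw [findUniqGo_spec (a.zip (a.map normKey)) PySem.Set.empty []
    (by intro k; simp [PySem.Set.empty])]
  rw [zip_map_self normKey a]
  have hsnd : (a.map (fun e => (e, normKey e))).map Prod.snd = a.map normKey := by
    simp [List.map_map, Function.comp]
  rw [hsnd, List.find?_map]
  simp only [List.nil_append, Function.comp_def]
  cases h : a.find? (fun e => (a.map normKey).count (normKey e) == 1) with
  | none => rfl
  | some e => rfl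

-- ===== VERDICT (by name: the statement is the Claim_ definition above) =====
theorem find_uniq_spec : Claim_equal_find_uniq := by
  intro a _ _
  unfold Spec_find_uniq
  rw [find_uniq_eq_firstUniq, find_uniq_alt_eq_firstUniq]
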